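-- pv_equiv track=rewrite | github.com/gargajit/dsa_problems | intermediate/sum_odd_idx_ele_in_range.py | sumOfOddIndexedElements
-- ===== SOURCE A (Python) =====
-- def sumOfOddIndexedElements(A, B):
--     N = len(A)
--     Ps = [0] * N
--     Q = len(B)
--     res = [0] * Q
--
--     # Odd indexed based Prefix Sum
--     for i in range(1, N):
--         if i % 2 == 1:
--             Ps[i] = Ps[i-1] + A[i]
--         else:
--             Ps[i] = Ps[i-1]
--
--     #
--     for i in range(Q):
--         L = B[i][0]
--         R = B[i][1]
--
--         if L > 0:
--             res[i] = Ps[R] - Ps[L-1]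
--         else:
--             res[i] = Ps[R]
--
--     return res
-- ===== SOURCE B (Python) =====
-- def sumOfOddIndexedElements(A, B):
--     def oddSumUpTo(k):
--         return sum(A[j] for j in range(k + 1) if j % 2 == 1)
--     return [oddSumUpTo(R) - oddSumUpTo(L - 1) for L, R in B]
-- ===== Notes on version B (the rewrite author's own statement) =====
-- stated objective: simpler
-- what changed: Drops A's precomputed odd-index prefix-sum table; each query is answered by two direct scans of A, oddSumUpTo(R) - oddSumUpTo(L-1). Pre_ excludes queries with R < 0, where A reads the prefix table at a position counted from its end while B sums an empty range and returns 0 - either value is a defensible reading of such a query.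
-- outside the precondition, e.g. on sumOfOddIndexedElements([5, 7], [(0, -1)]): A returns [7], B returns [0]
import Mathlib
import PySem

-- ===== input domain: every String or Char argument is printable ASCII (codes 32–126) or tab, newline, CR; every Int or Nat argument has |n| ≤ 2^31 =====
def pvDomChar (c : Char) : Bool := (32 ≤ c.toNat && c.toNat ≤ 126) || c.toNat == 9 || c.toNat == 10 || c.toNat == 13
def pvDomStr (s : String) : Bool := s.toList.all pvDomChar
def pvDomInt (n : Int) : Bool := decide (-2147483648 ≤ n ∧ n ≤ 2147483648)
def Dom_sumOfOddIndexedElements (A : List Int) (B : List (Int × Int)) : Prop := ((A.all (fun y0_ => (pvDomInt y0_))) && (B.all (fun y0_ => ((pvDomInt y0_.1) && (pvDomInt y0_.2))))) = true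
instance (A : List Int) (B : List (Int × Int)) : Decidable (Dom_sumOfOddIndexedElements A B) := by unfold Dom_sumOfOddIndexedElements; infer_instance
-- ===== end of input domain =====

-- B drops A's precomputed odd-index prefix-sum table; each query is answered by direct scans of A (simpler decomposition).


-- ===== PORT A =====
-- one step of A's prefix-sum loop body (Ps[i] = Ps[i-1] + A[i] if i odd else Ps[i-1])
def psStep (A : List Int) (ps : List Int) (i : Int) : List Int :=
  if PySem.Int.mod i 2 = 1 then
    PySem.List.pySetD ps i (PySem.List.pyGetD ps (i - 1) 0 + PySem.List.pyGetD A i 0)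
  else
    PySem.List.pySetD ps i (PySem.List.pyGetD ps (i - 1) 0)

def sumOfOddIndexedElements (A : List Int) (B : List (Int × Int)) : List Int :=
  let Ps := (PySem.List.pyRange 1 (A.length : Int) 1).foldl (psStep A) (List.replicate A.length 0)
  B.map (fun q =>
    if q.1 > 0 then PySem.List.pyGetD Ps q.2 0 - PySem.List.pyGetD Ps (q.1 - 1) 0
    else PySem.List.pyGetD Ps q.2 0)

-- ===== PORT B =====
-- Source B's helper: sum of A[j] over odd j in range(k+1)
def oddSumUpTo (A : List Int) (k : Int) : Int :=
  (PySem.List.pyRange 0 (k + 1) 1).foldl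
    (fun s j => if PySem.Int.mod j 2 = 1 then s + PySem.List.pyGetD A j 0 else s) 0

def sumOfOddIndexedElements_alt (A : List Int) (B : List (Int × Int)) : List Int :=
  B.map (fun q => oddSumUpTo A q.2 - oddSumUpTo A (q.1 - 1))

-- ===== PRECONDITION & SPEC =====
-- Pre_ excludes the inputs on which A raises IndexError (a query with R outside [-N, N) or L > N),
-- and additionally queries with R < 0: for a range ending before the start of the list A reads the
-- prefix table at position R counted from its end (returning the prefix sum up to R+N) while B sums
-- the empty range and returns 0 — either value is a defensible reading of such a query, so it lies
-- outside the claim.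
def Pre_sumOfOddIndexedElements (A : List Int) (B : List (Int × Int)) : Prop :=
  ∀ q ∈ B, 0 ≤ q.2 ∧ q.2 < (A.length : Int) ∧ q.1 ≤ (A.length : Int)
instance (A : List Int) (B : List (Int × Int)) : Decidable (Pre_sumOfOddIndexedElements A B) := by unfold Pre_sumOfOddIndexedElements; infer_instance

def pvWitness_sumOfOddIndexedElements : List Int × (List (Int × Int)) := ([5, 7], [(0, 1), (1, 1), (-3, 0), (2, 1)])

def Spec_sumOfOddIndexedElements (A : List Int) (B : List (Int × Int)) (out : List Int) : Prop := out = sumOfOddIndexedElements_alt A B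
instance (A : List Int) (B : List (Int × Int)) (out : List Int) : Decidable (Spec_sumOfOddIndexedElements A B out) := by unfold Spec_sumOfOddIndexedElements; infer_instance

-- ===== CLAIM (what is proved, stated in full; the proofs are below) =====
def Claim_equal_sumOfOddIndexedElements : Prop := ∀ (A : List Int) (B : List (Int × Int)), Dom_sumOfOddIndexedElements A B → Pre_sumOfOddIndexedElements A B → Spec_sumOfOddIndexedElements A B (sumOfOddIndexedElements A B)

-- ===== LEMMAS AND PROOFS =====
-- mathematical description: sum of A[j] over odd j < n
def oddPre (A : List Int) : Nat → Int
  | 0 => 0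
  | n + 1 => oddPre A n + (if n % 2 = 1 then A.getD n 0 else 0)

theorem getD_set' (l : List Int) (n : Nat) (v : Int) (i : Nat) (h : n < l.length) :
    (l.set n v).getD i 0 = if i = n then v else l.getD i 0 := by
  by_cases hi : i = n
  · subst hi; simp [List.getD_eq_getElem?_getD, h]
  · simp [List.getD_eq_getElem?_getD, hi, Ne.symm hi]

theorem getD_rep (m i : Nat) : (List.replicate m (0:Int)).getD i 0 = 0 := by
  by_cases h : i < m <;> simp [List.getD_eq_getElem?_getD, h]

lemma oddSumUpTo_eq (A : List Int) (n : Nat) : oddSumUpTo A ((n : Int) - 1) = oddPre A n := by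
  induction n with
  | zero => simp [oddSumUpTo, PySem.List.pyRange_one_eq_nil, oddPre]
  | succ n ih =>
    unfold oddSumUpTo at *
    rw [show (((n:Nat)+1 : Nat) : Int) - 1 + 1 = ((n : Int) - 1 + 1) + 1 by push_cast; ring,
        PySem.List.pyRange_one_succ_right (by omega), List.foldl_append]
    rw [ih]
    have hm : PySem.Int.mod ((n : Int) - 1 + 1) 2 = ((n % 2 : Nat) : Int) := by
      rw [show (n : Int) - 1 + 1 = (n : Int) by ring]
      exact_mod_cast PySem.Int.mod_natCast n 2
    simp only [List.foldl_cons, List.foldl_nil, hm]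
    by_cases h : n % 2 = 1
    · simp [h, oddPre, show (n : Int) - 1 + 1 = (n : Int) by ring]
    · have h2 : n % 2 = 0 := by omega
      simp [h2, oddPre]

lemma oddSumUpTo_neg (A : List Int) (k : Int) (h : k < 0) : oddSumUpTo A k = 0 := by
  unfold oddSumUpTo
  rw [PySem.List.pyRange_one_eq_nil (by omega)]
  rfl

lemma psFold_getD (A : List Int) (n : Nat) (hn : n ≤ A.length) :
    ((PySem.List.pyRange 1 (n : Int) 1).foldl (psStep A) (List.replicate A.length 0)).length = A.length ∧
    ∀ i : Nat, ((PySem.List.pyRange 1 (n : Int) 1).foldl (psStep A) (List.replicate A.length 0)).getD i 0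
      = if i < n ∧ i < A.length then oddPre A (i + 1) else 0 := by
  induction n with
  | zero =>
    rw [PySem.List.pyRange_one_eq_nil (by omega)]
    simp only [List.foldl_nil]
    refine ⟨List.length_replicate, fun i => ?_⟩
    rw [getD_rep]; simp
  | succ n ih =>
    rcases Nat.eq_zero_or_pos n with hz | hpos
    · subst hz
      rw [show ((1:Nat) : Int) = (1:Int) by norm_num, PySem.List.pyRange_one_eq_nil (by omega)]
      simp only [List.foldl_nil]
      refine ⟨List.length_replicate, fun i => ?_⟩
      rw [getD_rep]
      split_ifs with h
      · have : i = 0 := by omega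
        subst this; simp [oddPre]
      · rfl
    · have hn' : n ≤ A.length := by omega
      obtain ⟨hlen, hget⟩ := ih hn'
      rw [show (((n:Nat)+1 : Nat) : Int) = (n : Int) + 1 by push_cast; ring,
          PySem.List.pyRange_one_succ_right (by exact_mod_cast hpos), List.foldl_append]
      set Pn := (PySem.List.pyRange 1 (n : Int) 1).foldl (psStep A) (List.replicate A.length 0) with hPn
      have hm : PySem.Int.mod ((n : Int)) 2 = ((n % 2 : Nat) : Int) := by
        exact_mod_cast PySem.Int.mod_natCast n 2
      have hsub : PySem.List.pyGetD Pn ((n : Int) - 1) 0 = oddPre A n := by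
        rw [show (n:Int) - 1 = ((n - 1 : Nat) : Int) by omega, PySem.List.pyGetD_natCast]
        rw [hget (n-1)]
        have : n - 1 < n ∧ n - 1 < A.length := by omega
        simp only [this, and_self, if_true]
        congr 1; omega
      have hA : PySem.List.pyGetD A ((n : Int)) 0 = A.getD n 0 := by
        rw [PySem.List.pyGetD_natCast]
      have hstep : psStep A Pn (n : Int) = Pn.set n (oddPre A (n + 1)) := by
        unfold psStep
        rw [hm, hsub, hA]
        by_cases h : n % 2 = 1
        · simp [h, PySem.List.pySetD_natCast, oddPre]
        · have h0 : n % 2 = 0 := by omega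
          simp [h0, PySem.List.pySetD_natCast, oddPre]
      simp only [List.foldl_cons, List.foldl_nil, hstep]
      constructor
      · simp [hlen]
      · intro i
        rw [getD_set' _ _ _ _ (by omega)]
        by_cases hi : i = n
        · rw [if_pos hi, if_pos ⟨by omega, by omega⟩, hi]
        · rw [if_neg hi, hget i]
          by_cases h1 : i < n ∧ i < A.length
          · rw [if_pos h1, if_pos ⟨by omega, h1.2⟩]
          · rw [if_neg h1, if_neg (by omega)]

-- the prefix-table lookup at a non-negative in-range index equals B's per-query scan
lemma getPs_eq (A : List Int) (R : Int) (h1 : 0 ≤ R) (h2 : R < (A.length : Int)) :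
    PySem.List.pyGetD ((PySem.List.pyRange 1 (A.length : Int) 1).foldl (psStep A) (List.replicate A.length 0)) R 0
      = oddSumUpTo A R := by
  obtain ⟨hlen, hget⟩ := psFold_getD A A.length le_rfl
  rw [show R = ((R.toNat : Nat) : Int) by omega, PySem.List.pyGetD_natCast, hget]
  rw [if_pos ⟨by omega, by omega⟩]
  have h := oddSumUpTo_eq A (R.toNat + 1)
  rw [show ((R.toNat + 1 : Nat) : Int) - 1 = ((R.toNat : Nat) : Int) by push_cast; omega] at h
  exact h.symm

-- ===== VERDICT (by name: the statement is the Claim_ definition above) =====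
theorem sumOfOddIndexedElements_spec : Claim_equal_sumOfOddIndexedElements := by
  intro A B hDom hPre
  show sumOfOddIndexedElements A B = sumOfOddIndexedElements_alt A B
  unfold sumOfOddIndexedElements sumOfOddIndexedElements_alt
  apply List.map_congr_left
  intro q hq
  obtain ⟨h1, h2, h3⟩ := hPre q hq
  have hR := getPs_eq A q.2 h1 h2
  by_cases hL : q.1 > 0
  · have hLv := getPs_eq A (q.1 - 1) (by omega) (by omega)
    simp only [hL, if_pos, hR, hLv]
  · rw [if_neg hL, hR, oddSumUpTo_neg A (q.1 - 1) (by omega)]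
    ring
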